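-- pv_equiv track=rewrite | github.com/violetcodes/doc-parsing-poc | code/normalize_candidates.py | get_rightest_num
-- ===== SOURCE A (Python) =====
-- def get_rightest_num(left_split):
--     '''let's say you have 'for 30 days he gains 89 pounds', which is a left split of a string
--     and you wand to extract rightest num'''
--
--     i=len(left_split)-1
--     while i>=0:
--         if left_split[i].isdigit():
--             if i-1>=0 and left_split[i].isdigit():
--                 number_from_left = left_split[i-1:i+1]
--                 return number_from_left
--             else:
--                 number_from_left = left_split[i]
--                 return number_from_left
--         i -= 1
-- ===== SOURCE B (Python) =====
-- def get_rightest_num(left_split):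
--     last = None
--     for i, ch in enumerate(left_split):
--         if ch.isdigit():
--             last = i
--     if last is None:
--         return None
--     return left_split[max(0, last - 1):last + 1]
-- ===== Notes on version B (the rewrite author's own statement) =====
-- stated objective: simpler
-- what changed: A's backward early-exit scan with a duplicated digit test and two return branches is replaced by a single forward pass recording the last digit index plus one uniform slice left_split[max(0,i-1):i+1].
import Mathlib
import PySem

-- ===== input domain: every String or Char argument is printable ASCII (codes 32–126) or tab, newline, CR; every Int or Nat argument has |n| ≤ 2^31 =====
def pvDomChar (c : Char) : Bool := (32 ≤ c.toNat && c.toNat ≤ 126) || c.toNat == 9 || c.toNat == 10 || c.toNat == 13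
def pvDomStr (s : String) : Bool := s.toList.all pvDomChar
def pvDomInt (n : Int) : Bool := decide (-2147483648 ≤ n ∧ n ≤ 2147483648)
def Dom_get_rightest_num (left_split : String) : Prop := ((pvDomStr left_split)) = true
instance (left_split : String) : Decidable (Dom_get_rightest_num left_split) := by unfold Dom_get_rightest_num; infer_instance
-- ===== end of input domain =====

-- B replaces A's backward early-exit scan (duplicated digit test, two return branches) by a
-- single forward pass recording the last digit index and one uniform slice; objective: simpler.

-- ===== PORT A =====
-- while i >= 0 loop, i = fuel - 1; indices accessed are always in range so getD's default is never used
def goA (cs : List Char) : Nat → Option String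
  | 0 => none
  | n + 1 =>
    if PySem.Chars.isdigit (cs.getD n ' ') then
      if decide (0 ≤ (n : Int) - 1) && PySem.Chars.isdigit (cs.getD n ' ') then
        some (String.mk (PySem.List.slice cs (some ((n : Int) - 1)) (some ((n : Int) + 1))))
      else
        some (String.mk [cs.getD n ' '])
    else goA cs n

def get_rightest_num (left_split : String) : Option String :=
  goA left_split.toList left_split.toList.length

-- ===== PORT B =====
def get_rightest_num_alt (left_split : String) : Option String :=
  let cs := left_split.toList
  match (PySem.List.enumerate cs 0).foldl
      (fun acc p => if PySem.Chars.isdigit p.2 then some p.1 else acc) none with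
  | none => none
  | some i => some (String.mk (PySem.List.slice cs (some (max 0 (i - 1))) (some (i + 1))))

-- ===== PRECONDITION & SPEC =====
def Spec_get_rightest_num (left_split : String) (out : Option String) : Prop := out = get_rightest_num_alt left_split
instance (left_split : String) (out : Option String) : Decidable (Spec_get_rightest_num left_split out) := by unfold Spec_get_rightest_num; infer_instance

-- ===== CLAIM (what is proved, stated in full; the proofs are below) =====
def Claim_equal_get_rightest_num : Prop := ∀ (left_split : String), Dom_get_rightest_num left_split → Spec_get_rightest_num left_split (get_rightest_num left_split)

-- ===== LEMMAS AND PROOFS =====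

def pvStep : Option Int → Int × Char → Option Int :=
  fun acc p => if PySem.Chars.isdigit p.2 then some p.1 else acc

def pvOut (cs : List Char) (i : Int) : String :=
  String.mk (PySem.List.slice cs (some (max 0 (i - 1))) (some (i + 1)))

lemma goA_eq (cs : List Char) (n : Nat) (hn : n ≤ cs.length) :
    goA cs n = ((PySem.List.enumerate (cs.take n) 0).foldl pvStep none).map (pvOut cs) := by
  induction n with
  | zero => simp [goA]
  | succ n ih =>
    have hlt : n < cs.length := hn
    have htake : cs.take (n + 1) = cs.take n ++ [cs[n]] := by
      rw [List.take_succ]; simp [List.getElem?_eq_getElem hlt]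
    have hlen : (cs.take n).length = n := by simp [Nat.le_of_lt hlt]
    rw [htake, PySem.List.enumerate_append, List.foldl_append, hlen]
    have hsome : cs[n]? = some cs[n] := List.getElem?_eq_getElem hlt
    by_cases hd : PySem.Chars.isdigit cs[n]
    · -- digit at index n
      by_cases h1 : 1 ≤ n
      · have hmax : max (0 : Int) ((n : Int) - 1) = (n : Int) - 1 := by omega
        simp [goA, hsome, hd, PySem.List.enumerate, pvStep, pvOut, hmax]
        intro h0
        omega
      · have hn0 : n = 0 := by omega
        subst hn0
        simp [goA, hsome, hd, PySem.List.enumerate, pvStep, pvOut]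
        rw [PySem.List.slice_to cs (by omega : (0:Int) ≤ 1)]
        cases cs with
        | nil => simp at hlt
        | cons c cs' => simp
    · simp [goA, hsome, hd, PySem.List.enumerate, pvStep]
      exact ih (Nat.le_of_lt hlt)

-- ===== VERDICT (by name: the statement is the Claim_ definition above) =====
theorem get_rightest_num_spec : Claim_equal_get_rightest_num := by
  intro s _
  unfold Spec_get_rightest_num get_rightest_num get_rightest_num_alt
  rw [goA_eq s.toList s.toList.length le_rfl, List.take_length]
  cases h : (PySem.List.enumerate s.toList 0).foldl pvStep none with
  | none => unfold pvStep at h; simp only [h, Option.map_none]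
  | some i => unfold pvStep at h; simp only [h, Option.map_some]; simp [pvOut]
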